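-- pv_equiv track=rewrite | github.com/kvasir-ai/rune | src/cli/site/scanner.py | _rule_description
-- ===== SOURCE A (Python) =====
-- def _rule_description(text: str, fm: dict[str, str]) -> str:
--     if fm.get("description"):
--         return fm["description"]
--
--     in_frontmatter = False
--     frontmatter_closed = False
--     for line in text.splitlines():
--         if line.strip() == "---" and not frontmatter_closed:
--             in_frontmatter = not in_frontmatter
--             if not in_frontmatter:
--                 frontmatter_closed = True
--             continue
--         if not in_frontmatter and line.startswith("# "):
--             return line.lstrip("# ").strip()
--     return ""
-- ===== SOURCE B (Python) =====
-- def _split_at_delim(lines):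
--     """Split at the first '---' line: (lines before it, lines after it), or None."""
--     for i, line in enumerate(lines):
--         if line.strip() == "---":
--             return lines[:i], lines[i + 1:]
--     return None
--
--
-- def _rule_description(text: str, fm: dict[str, str]) -> str:
--     if fm.get("description"):
--         return fm["description"]
--
--     lines = text.splitlines()
--     split = _split_at_delim(lines)
--     if split is None:
--         visible = lines
--     else:
--         before, rest = split
--         split2 = _split_at_delim(rest)
--         visible = before if split2 is None else before + split2[1]
--
--     for line in visible:
--         if line.startswith("# "):
--             return line.lstrip("# ").strip()
--     return ""
-- ===== Notes on version B (the rewrite author's own statement) =====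
-- stated objective: simpler
-- what changed: Replaces the stateful in_frontmatter/frontmatter_closed toggle pass with a two-phase decomposition: first compute the visible lines by splitting off the frontmatter block at the two '---' delimiters, then a plain scan of the visible lines for the first '# ' heading.
import Mathlib
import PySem

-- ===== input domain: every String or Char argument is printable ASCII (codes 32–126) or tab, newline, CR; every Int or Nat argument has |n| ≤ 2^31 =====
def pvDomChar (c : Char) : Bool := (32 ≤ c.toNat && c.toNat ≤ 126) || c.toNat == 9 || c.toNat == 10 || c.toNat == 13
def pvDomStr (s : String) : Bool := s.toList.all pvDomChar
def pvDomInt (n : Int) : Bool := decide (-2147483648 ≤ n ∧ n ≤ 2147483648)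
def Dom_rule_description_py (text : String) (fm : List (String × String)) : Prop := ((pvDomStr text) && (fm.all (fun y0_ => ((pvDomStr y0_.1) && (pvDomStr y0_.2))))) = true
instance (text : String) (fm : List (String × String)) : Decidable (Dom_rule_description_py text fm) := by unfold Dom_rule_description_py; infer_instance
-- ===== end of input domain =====

-- B replaces A's stateful toggle pass with a two-phase decomposition (compute the
-- visible lines, then scan them for the first heading); objective: simpler.

-- fm.get("description") / fm["description"]: first-match lookup in the association list
def fmDesc (fm : List (String × String)) : String :=
  ((fm.find? (fun p => p.1 == "description")).map (·.2)).getD ""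

-- line.lstrip("# ").strip()  — lstrip with a char set ported by hand (dropWhile), exact
def stripHeading (line : String) : String :=
  PySem.Str.strip (String.mk (line.toList.dropWhile (fun c => c == '#' || c == ' ')))

-- ===== PORT A =====
-- the for-loop over splitlines with state (in_frontmatter, frontmatter_closed)
def ruleLoopA : List String → Bool → Bool → String
  | [], _, _ => ""
  | line :: rest, inFm, closed =>
    if PySem.Str.strip line == "---" && !closed then
      let inFm' := !inFm
      ruleLoopA rest inFm' (if !inFm' then true else closed)
    else if !inFm && PySem.Str.startswith line "# " then
      stripHeading line
    else
      ruleLoopA rest inFm closed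

def rule_description_py (text : String) (fm : List (String × String)) : String :=
  if fmDesc fm ≠ "" then fmDesc fm
  else ruleLoopA (PySem.Str.splitlines text) false false

-- ===== PORT B =====
-- _split_at_delim: first '---' line splits the list into (before, after); None if absent
def splitAtDelim : List String → Option (List String × List String)
  | [] => none
  | line :: rest =>
    if PySem.Str.strip line == "---" then some ([], rest)
    else
      match splitAtDelim rest with
      | none => none
      | some (b, r) => some (line :: b, r)

def visibleLines (lines : List String) : List String :=
  match splitAtDelim lines with
  | none => lines
  | some (before, rest) =>
    match splitAtDelim rest with
    | none => before
    | some (_, tail) => before ++ tail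

def scanVisible : List String → String
  | [] => ""
  | line :: rest =>
    if PySem.Str.startswith line "# " then stripHeading line
    else scanVisible rest

def rule_description_py_alt (text : String) (fm : List (String × String)) : String :=
  if fmDesc fm ≠ "" then fmDesc fm
  else scanVisible (visibleLines (PySem.Str.splitlines text))

-- ===== PRECONDITION & SPEC =====
def Spec_rule_description_py (text : String) (fm : List (String × String)) (out : String) : Prop := out = rule_description_py_alt text fm
instance (text : String) (fm : List (String × String)) (out : String) : Decidable (Spec_rule_description_py text fm out) := by unfold Spec_rule_description_py; infer_instance

-- ===== CLAIM (what is proved, stated in full; the proofs are below) =====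
def Claim_equal_rule_description_py : Prop := ∀ (text : String) (fm : List (String × String)), Dom_rule_description_py text fm → Spec_rule_description_py text fm (rule_description_py text fm)

-- ===== LEMMAS AND PROOFS =====

-- closed state: A's loop is a plain heading scan
theorem loopA_closed (ls : List String) : ruleLoopA ls false true = scanVisible ls := by
  induction ls with
  | nil => rfl
  | cons l rest ih =>
    simp only [ruleLoopA, scanVisible]
    split <;> simp_all

-- inside frontmatter: skip to the closing delimiter, then the closed scan
theorem loopA_inFm (ls : List String) :
    ruleLoopA ls true false =
      (match splitAtDelim ls with
       | none => ""
       | some (_, t) => ruleLoopA t false true) := by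
  induction ls with
  | nil => rfl
  | cons l rest ih =>
    by_cases h : PySem.Str.strip l == "---"
    · simp [ruleLoopA, splitAtDelim, h]
    · simp only [ruleLoopA, splitAtDelim, h]
      rw [if_neg (by simp), if_neg (by simp), ih]
      cases h1 : splitAtDelim rest with
      | none => simp
      | some p => obtain ⟨b, r⟩ := p; simp

-- a non-delimiter head stays visible
theorem visible_cons (l : String) (rest : List String) (h : ¬ (PySem.Str.strip l == "---") = true) :
    visibleLines (l :: rest) = l :: visibleLines rest := by
  simp only [visibleLines, splitAtDelim, if_neg h]
  cases h1 : splitAtDelim rest with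
  | none => simp
  | some p =>
    obtain ⟨b, r⟩ := p
    rcases h2 : splitAtDelim r with _ | ⟨x, t⟩ <;> simp [h2]

-- main: A's loop from the initial state equals B's visible-lines scan
theorem loopA_main (ls : List String) :
    ruleLoopA ls false false = scanVisible (visibleLines ls) := by
  induction ls with
  | nil => rfl
  | cons l rest ih =>
    by_cases h : PySem.Str.strip l == "---"
    · have hstep : ruleLoopA (l :: rest) false false = ruleLoopA rest true false := by
        simp [ruleLoopA, h]
      rw [hstep, loopA_inFm]
      simp only [visibleLines, splitAtDelim, if_pos h]
      cases h1 : splitAtDelim rest with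
      | none => rfl
      | some p =>
        obtain ⟨b, r⟩ := p
        simp [loopA_closed]
    · rw [visible_cons l rest h]
      simp only [ruleLoopA, scanVisible, h]
      rw [if_neg (by simp)]
      simp only [Bool.not_false, Bool.true_and]
      split
      · rfl
      · exact ih

-- ===== VERDICT (by name: the statement is the Claim_ definition above) =====
theorem rule_description_py_spec : Claim_equal_rule_description_py := by
  intro text fm _
  unfold Spec_rule_description_py rule_description_py rule_description_py_alt
  split
  · rfl
  · exact loopA_main _
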